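-- pv_equiv track=rewrite | github.com/HimanshuKumar17052001/AR | extract_tables.py | should_add_consolidated_prefix
-- ===== SOURCE A (Python) =====
-- from typing import List, Dict, Any, Optional
--
-- def should_add_consolidated_prefix(
--     page_num: int, all_page_phrases: Dict[int, List[str]]
-- ) -> bool:
--     """Determine if a page should have 'consolidated' prefix based on its position after Cash Flow Statement."""
--     # Get all page numbers sorted
--     all_pages = sorted(all_page_phrases.keys())
--
--     # Find the last Cash Flow Statement page
--     last_cash_flow_page = None
--     for page in all_pages:
--         phrases = all_page_phrases[page]
--         if any("cash flow statement" in phrase.lower() for phrase in phrases):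
--             last_cash_flow_page = page
--
--     # If no Cash Flow Statement found, return False
--     if last_cash_flow_page is None:
--         return False
--
--     # Check if current page comes after the last Cash Flow Statement page
--     return page_num > last_cash_flow_page
-- ===== SOURCE B (Python) =====
-- def should_add_consolidated_prefix(page_num, all_page_phrases):
--     """Determine if a page should have 'consolidated' prefix based on its position after Cash Flow Statement."""
--     # One pass, no sort and no max: the page comes after the LAST cash-flow page
--     # iff some page qualifies and every qualifying page is strictly below page_num.
--     found = False
--     for page, phrases in all_page_phrases.items():
--         if any("cash flow statement" in phrase.lower() for phrase in phrases):
--             if page >= page_num: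
--                 return False
--             found = True
--     return found
-- ===== Notes on version B (the rewrite author's own statement) =====
-- stated objective: faster
-- what changed: Never computes the last/maximum cash-flow page at all: a single unsorted pass keeps one boolean and returns False early as soon as a qualifying page >= page_num is seen, using the equivalence 'page_num > max qualifying' iff 'some page qualifies and all qualifying pages are < page_num'.
import Mathlib
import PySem

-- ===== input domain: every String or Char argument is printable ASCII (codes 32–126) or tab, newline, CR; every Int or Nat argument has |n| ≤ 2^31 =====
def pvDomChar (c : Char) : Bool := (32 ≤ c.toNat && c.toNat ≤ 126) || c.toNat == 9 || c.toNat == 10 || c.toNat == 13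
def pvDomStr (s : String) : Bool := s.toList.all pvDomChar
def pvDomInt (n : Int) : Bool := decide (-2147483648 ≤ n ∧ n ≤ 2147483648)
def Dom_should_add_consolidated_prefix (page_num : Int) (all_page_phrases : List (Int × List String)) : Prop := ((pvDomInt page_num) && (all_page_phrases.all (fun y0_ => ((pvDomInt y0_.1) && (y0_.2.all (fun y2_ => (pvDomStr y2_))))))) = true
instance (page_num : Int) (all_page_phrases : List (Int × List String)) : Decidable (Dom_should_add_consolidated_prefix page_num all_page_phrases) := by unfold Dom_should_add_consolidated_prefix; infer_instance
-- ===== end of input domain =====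

-- B never computes the last cash-flow page: one unsorted pass with a boolean flag and an early
-- False exit on a qualifying page ≥ page_num (alternative decomposition, no sort, no max).

-- ===== PORT A =====
-- "cash flow statement" in phrase.lower()
def pvCfs (phrase : String) : Bool :=
  PySem.Str.isIn "cash flow statement" (PySem.Str.lower phrase)

def should_add_consolidated_prefix (page_num : Int) (all_page_phrases : List (Int × List String)) : Bool :=
  let all_pages := PySem.List.sorted (all_page_phrases.map Prod.fst) (fun x => x) false
  let last_cash_flow_page : Option Int :=
    all_pages.foldl
      (fun acc page =>
        let phrases := (PySem.Dict.mk all_page_phrases).getD page []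
        if phrases.any (fun phrase => pvCfs phrase) then some page else acc)
      none
  match last_cash_flow_page with
  | none => false
  | some l => decide (page_num > l)

-- ===== PORT B =====
-- the 'for' loop with its early 'return False' and the 'found' flag
def pvAltLoop (page_num : Int) (items : List (Int × List String)) (found : Bool) : Bool :=
  match items with
  | [] => found
  | (page, phrases) :: rest =>
    if phrases.any (fun phrase => pvCfs phrase) then
      if page ≥ page_num then false
      else pvAltLoop page_num rest true
    else pvAltLoop page_num rest found

def should_add_consolidated_prefix_alt (page_num : Int) (all_page_phrases : List (Int × List String)) : Bool :=
  pvAltLoop page_num all_page_phrases false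

-- ===== PRECONDITION & SPEC =====
-- Pre_ excludes association lists with duplicate keys: they represent no Python dict (a Python
-- dict's keys are unique), and A's first-match lookup there is an artefact of the encoding.
def Pre_should_add_consolidated_prefix (page_num : Int) (all_page_phrases : List (Int × List String)) : Prop :=
  (all_page_phrases.map Prod.fst).Nodup
instance (page_num : Int) (all_page_phrases : List (Int × List String)) : Decidable (Pre_should_add_consolidated_prefix page_num all_page_phrases) := by unfold Pre_should_add_consolidated_prefix; infer_instance

def pvWitness_should_add_consolidated_prefix : Int × (List (Int × List String)) :=
  (5, [(3, ["Cash Flow Statement"]), (4, ["notes"])])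

def Spec_should_add_consolidated_prefix (page_num : Int) (all_page_phrases : List (Int × List String)) (out : Bool) : Prop := out = should_add_consolidated_prefix_alt page_num all_page_phrases
instance (page_num : Int) (all_page_phrases : List (Int × List String)) (out : Bool) : Decidable (Spec_should_add_consolidated_prefix page_num all_page_phrases out) := by unfold Spec_should_add_consolidated_prefix; infer_instance

-- ===== CLAIM (what is proved, stated in full; the proofs are below) =====
def Claim_equal_should_add_consolidated_prefix : Prop := ∀ (page_num : Int) (all_page_phrases : List (Int × List String)), Dom_should_add_consolidated_prefix page_num all_page_phrases → Pre_should_add_consolidated_prefix page_num all_page_phrases → Spec_should_add_consolidated_prefix page_num all_page_phrases (should_add_consolidated_prefix page_num all_page_phrases)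

-- ===== LEMMAS AND PROOFS =====

-- the qualifying predicate on an item
def pvQ (kv : Int × List String) : Bool := kv.2.any (fun phrase => pvCfs phrase)

-- "maximum of l as an option": none iff empty, some m iff m is a member bounding the list.
def pvOptMax (l : List Int) (o : Option Int) : Prop :=
  (o = none ↔ l = []) ∧ ∀ m, o = some m → m ∈ l ∧ ∀ y ∈ l, y ≤ m

-- A's overwrite-scan over an ascending list computes the option-maximum of the qualifying elements.
theorem pvFoldA (f : Int → Bool) (S : List Int) (hS : S.Pairwise (· ≤ ·)) :
    pvOptMax (S.filter f) (S.foldl (fun acc page => if f page then some page else acc) none) := by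
  induction S using List.reverseRecOn with
  | nil => exact ⟨by simp, by simp⟩
  | append_singleton S' a ih =>
    have hS' : S'.Pairwise (· ≤ ·) := hS.sublist (by simp)
    have hlast : ∀ y ∈ S', y ≤ a := by
      have := List.pairwise_append.mp hS
      exact fun y hy => this.2.2 y hy a (by simp)
    obtain ⟨ihe, ihs⟩ := ih hS'
    rw [List.foldl_append, List.filter_append]
    by_cases hfa : f a = true
    · simp only [List.foldl, hfa, if_pos, List.filter_cons, List.filter_nil]
      constructor
      · simp
      · intro m hm
        obtain rfl : a = m := by simpa using hm
        constructor
        · simp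
        · intro y hy
          rcases List.mem_append.mp hy with h | h
          · exact hlast y (List.mem_of_mem_filter h)
          · simp at h; omega
    · have hfa' : f a = false := by simpa using hfa
      simp only [List.foldl, hfa', List.filter_cons, List.filter_nil]
      simpa using ⟨ihe, ihs⟩

-- B's loop computes: 'found so far, or a qualifying item exists' AND 'every qualifying key < page_num'.
theorem pvAltLoop_eq (page_num : Int) (l : List (Int × List String)) (found : Bool) :
    pvAltLoop page_num l found =
      ((found || l.any pvQ) && l.all (fun kv => !pvQ kv || decide (kv.1 < page_num))) := by
  induction l generalizing found with
  | nil => simp [pvAltLoop]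
  | cons kv rest ih =>
    obtain ⟨page, phrases⟩ := kv
    by_cases hq : pvQ (page, phrases) = true
    · have hq' : phrases.any (fun phrase => pvCfs phrase) = true := hq
      by_cases hge : page ≥ page_num
      · simp [pvAltLoop, hq', hge, pvQ]
        try omega
      · simp [pvAltLoop, hq', hge, ih, pvQ]
        try omega
    · have hq' : phrases.any (fun phrase => pvCfs phrase) = false := by
        simpa [pvQ] using hq
      simp [pvAltLoop, hq', ih, pvQ]

-- With nodup keys, a dict lookup of a key returns the value paired with it.
theorem pvGetD_pair {all_page_phrases : List (Int × List String)}
    (hnd : (all_page_phrases.map Prod.fst).Nodup) {kv : Int × List String}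
    (hkv : kv ∈ all_page_phrases) :
    (PySem.Dict.mk all_page_phrases).getD kv.1 [] = kv.2 := by
  have h : (PySem.Dict.mk all_page_phrases).get? kv.1 = some kv.2 :=
    PySem.Dict.get?_of_mem_items (PySem.Dict.mk all_page_phrases) (by simpa using hkv) hnd
  exact PySem.Dict.getD_of_get?_eq_some (PySem.Dict.mk all_page_phrases) [] h

-- ===== VERDICT (by name: the statement is the Claim_ definition above) =====
theorem should_add_consolidated_prefix_spec : Claim_equal_should_add_consolidated_prefix := by
  intro page_num app _ hnd
  unfold Spec_should_add_consolidated_prefix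
  unfold should_add_consolidated_prefix should_add_consolidated_prefix_alt
  set g : Int → Bool :=
    fun page => ((PySem.Dict.mk app).getD page []).any (fun phrase => pvCfs phrase) with hg
  set S := PySem.List.sorted (app.map Prod.fst) (fun x => x) false with hSdef
  have hSpair : S.Pairwise (· ≤ ·) := PySem.List.sorted_pairwise (app.map Prod.fst) (fun x => x)
  obtain ⟨hAe, hAs⟩ := pvFoldA g S hSpair
  -- membership bridge: x is a qualifying sorted key iff some qualifying item of app has key x
  have hmem : ∀ x, x ∈ S.filter g ↔ ∃ kv ∈ app, pvQ kv = true ∧ kv.1 = x := by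
    intro x
    constructor
    · intro hx
      obtain ⟨hxS, hxg⟩ := List.mem_filter.mp hx
      have hxk : x ∈ app.map Prod.fst := (PySem.List.mem_sorted _ _ _ _).mp hxS
      obtain ⟨kv, hkv, rfl⟩ := List.mem_map.mp hxk
      refine ⟨kv, hkv, ?_, rfl⟩
      have hxg2 : ((PySem.Dict.mk app).getD kv.1 []).any (fun phrase => pvCfs phrase) = true := hxg
      rwa [pvGetD_pair hnd hkv] at hxg2
    · rintro ⟨kv, hkv, hq, rfl⟩
      refine List.mem_filter.mpr ⟨?_, ?_⟩
      · exact (PySem.List.mem_sorted _ _ _ _).mpr (List.mem_map.mpr ⟨kv, hkv, rfl⟩)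
      · show ((PySem.Dict.mk app).getD kv.1 []).any (fun phrase => pvCfs phrase) = true
        rw [pvGetD_pair hnd hkv]; exact hq
  rw [pvAltLoop_eq]
  show (match S.foldl (fun acc page => if g page then some page else acc) none with
        | none => false
        | some l => decide (page_num > l)) =
       ((false || app.any pvQ) && app.all (fun kv => !pvQ kv || decide (kv.1 < page_num)))
  cases hfold : S.foldl (fun acc page => if g page then some page else acc) none with
  | none =>
    have hempty : S.filter g = [] := hAe.mp hfold
    have hnone : app.any pvQ = false := by
      rw [List.any_eq_false]
      intro kv hkv hq
      have : kv.1 ∈ S.filter g := (hmem kv.1).mpr ⟨kv, hkv, by simpa using hq, rfl⟩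
      rw [hempty] at this; exact absurd this (List.not_mem_nil)
    simp [hnone]
  | some m =>
    obtain ⟨hmmem, hmax⟩ := hAs m hfold
    obtain ⟨kvm, hkvm, hqm, hkeym⟩ := (hmem m).mp hmmem
    have hany : app.any pvQ = true := List.any_eq_true.mpr ⟨kvm, hkvm, hqm⟩
    simp only [hany, Bool.false_or]
    by_cases hlt : page_num > m
    · have hall : app.all (fun kv => !pvQ kv || decide (kv.1 < page_num)) = true := by
        refine List.all_eq_true.mpr ?_
        intro kv hkv
        by_cases hq : pvQ kv = true
        · have : kv.1 ∈ S.filter g := (hmem kv.1).mpr ⟨kv, hkv, hq, rfl⟩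
          have := hmax kv.1 this
          simp [hq]; omega
        · simp [Bool.eq_false_iff.mpr hq]
      simp only [hall, Bool.and_true]
      simpa using hlt
    · have hnall : app.all (fun kv => !pvQ kv || decide (kv.1 < page_num)) = false := by
        refine (Bool.eq_false_iff).mpr ?_
        intro hall
        have := List.all_eq_true.mp hall kvm hkvm
        simp [hqm] at this
        omega
      simp only [hnall, Bool.and_false]
      simpa using hlt
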